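-- pv_equiv track=rewrite | github.com/shasuri/AlgorithmStudy | albbu/10th_week/2020_kakao_1.py | solution
-- ===== SOURCE A (Python) =====
-- def solution(new_id):
--
--     new_id = new_id.lower() # step1
--
--     temp_id = ""
--
--     for strIndex in range(len(new_id)) :
--         if not new_id[strIndex].isalnum() : # step2, 소문자 제외
--             if new_id[strIndex] == '-' or new_id[strIndex] == '_' or new_id[strIndex] == '.' :
--                 temp_id += new_id[strIndex] # step2, -_. 제외
--
--         else :
--             temp_id += new_id[strIndex] # 제외된 문자 추가
--
--     new_id = temp_id
--
--     temp_id = ""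
--     dotCount = 0
--     for strIndex in range(len(new_id)) : # step3, .줄이기
--
--         if new_id[strIndex] == "." :
--             if dotCount == 0 :
--                 temp_id += "."
--
--             dotCount += 1
--
--         else :
--             temp_id += new_id[strIndex]
--             dotCount = 0
--
--     temp_id = temp_id.strip('.') # step4
--
--     strSize = len(temp_id)
--
--     if strSize == 0 : # step5
--         temp_id += "a"
--         strSize += 1
--
--     if strSize > 15 : # step6
--         temp_id = temp_id[:15]
--         temp_id = temp_id.rstrip('.')
--         strSize = 15
--
--     if strSize <= 2 : # step7
--         last_char = temp_id[-1]
--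
--         for strIndex in range(3 - strSize) :
--             temp_id += last_char
--
--     answer = ''
--     answer = temp_id
--     return answer
-- ===== SOURCE B (Python) =====
-- def solution(new_id):
--     s = new_id.lower()
--     n = len(s)
--     out = []
--     i = 0
--     while i < n:
--         c = s[i]
--         if c.isalnum() or c in '-_':
--             out.append(c)
--             i += 1
--         elif c == '.':
--             out.append('.')
--             i += 1
--             # skip the rest of the run: anything that is neither alnum nor '-'/'_'
--             # (further dots collapse into the one just emitted, other chars are filtered out)
--             while i < n and not (s[i].isalnum() or s[i] in '-_'):
--                 i += 1
--         else:
--             i += 1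
--     t = ''.join(out).strip('.')
--     if not t:
--         t = 'a'
--     if len(t) > 15:
--         t = t[:15].rstrip('.')
--     elif len(t) < 3:
--         t += t[-1] * (3 - len(t))
--     return t
-- ===== Notes on version B (the rewrite author's own statement) =====
-- stated objective: alternative
-- what changed: A runs two staged per-character passes (a keep-filter loop, then a stateful dotCount loop collapsing dot runs) over the whole string; B is a single pointer scan that merges filtering and dot-collapsing: on a dot it emits one dot and jumps the pointer past the entire run of dot/filtered characters, so no per-character collapse state exists, and the length steps are done by slicing.
import Mathlib
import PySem

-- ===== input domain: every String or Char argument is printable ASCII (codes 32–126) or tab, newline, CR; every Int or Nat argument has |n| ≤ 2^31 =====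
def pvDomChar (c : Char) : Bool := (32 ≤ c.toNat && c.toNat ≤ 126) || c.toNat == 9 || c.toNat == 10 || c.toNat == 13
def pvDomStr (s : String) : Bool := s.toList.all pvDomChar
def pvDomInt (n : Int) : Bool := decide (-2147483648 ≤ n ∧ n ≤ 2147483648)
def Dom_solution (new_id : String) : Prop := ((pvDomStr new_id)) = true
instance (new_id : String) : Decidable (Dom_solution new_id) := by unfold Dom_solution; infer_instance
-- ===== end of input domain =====

-- B replaces A's two staged accumulator passes (keep-filter loop, then dotCount
-- run-collapsing loop) by one pointer scan that emits a single '.' per run and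
-- jumps past the run; same O(n) cost, different decomposition.

-- ===== PORT A =====
-- rstrip('.') has no PySem primitive; this drop-from-the-right is exact for a one-char strip set.
def pvRstripDot (t : List Char) : List Char :=
  (t.reverse.dropWhile (· == '.')).reverse

def solution (new_id : String) : String :=
  -- step1
  let s1 := PySem.Chars.lower new_id.toList
  -- step2: for each char, keep alnum and '-' '_' '.'
  let temp1 := s1.foldl (fun t c =>
      if ¬ (PySem.Chars.isalnum c = true) then
        (if c = '-' ∨ c = '_' ∨ c = '.' then t ++ [c] else t)
      else t ++ [c]) []
  -- step3: collapse dot runs with a dotCount counter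
  let st := temp1.foldl (fun (p : List Char × Int) c =>
      if c = '.' then ((if p.2 = 0 then p.1 ++ ['.'] else p.1), p.2 + 1)
      else (p.1 ++ [c], (0 : Int))) ([], 0)
  -- step4
  let t2 := PySem.Chars.stripChars st.1 ['.']
  let sz : Int := PySem.Chars.len t2
  -- step5
  let t3 := if sz = 0 then t2 ++ ['a'] else t2
  let sz3 : Int := if sz = 0 then sz + 1 else sz
  -- step6
  let t4 := if sz3 > 15 then pvRstripDot (PySem.List.slice t3 none (some 15)) else t3
  let sz4 : Int := if sz3 > 15 then 15 else sz3
  -- step7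
  let t5 := if sz4 ≤ 2 then
      match PySem.List.pyGet? t4 (-1) with
      | some lc => (PySem.List.pyRange 0 (3 - sz4) 1).foldl (fun t _ => t ++ [lc]) t4
      | none => t4
    else t4
  String.ofList t5

-- ===== PORT B =====
-- B's `c.isalnum() or c in '-_'` test
def pvAllowed (c : Char) : Bool := PySem.Chars.isalnum c || c == '-' || c == '_'

-- B's while loop as recursion on the remaining suffix; the inner run-skipping
-- while loop is the dropWhile.
def pvScan : List Char → List Char
  | [] => []
  | c :: rest =>
    if pvAllowed c then c :: pvScan rest
    else if c = '.' then '.' :: pvScan (rest.dropWhile (fun d => ¬ pvAllowed d))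
    else pvScan rest
termination_by l => l.length
decreasing_by
  · simp
  · exact Nat.lt_succ_of_le (rest.length_dropWhile_le _)
  · simp

def solution_alt (new_id : String) : String :=
  let t := PySem.Chars.stripChars (pvScan (PySem.Chars.lower new_id.toList)) ['.']
  let t1 := if t.isEmpty then ['a'] else t
  let t2 :=
    if t1.length > 15 then (((PySem.List.slice t1 none (some 15)).reverse.dropWhile (· == '.')).reverse)
    else if t1.length < 3 then
      match PySem.List.pyGet? t1 (-1) with
      | some lc => t1 ++ List.replicate (3 - t1.length) lc
      | none => t1
    else t1
  String.ofList t2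

-- ===== PRECONDITION & SPEC =====
def Spec_solution (new_id : String) (out : String) : Prop := out = solution_alt new_id
instance (new_id : String) (out : String) : Decidable (Spec_solution new_id out) := by unfold Spec_solution; infer_instance

-- ===== CLAIM (what is proved, stated in full; the proofs are below) =====
def Claim_equal_solution : Prop := ∀ (new_id : String), Dom_solution new_id → Spec_solution new_id (solution new_id)

-- ===== LEMMAS AND PROOFS =====

-- A's step-2 keep predicate.
def pvKeep (c : Char) : Bool := PySem.Chars.isalnum c || c == '-' || c == '_' || c == '.'

-- Intermediate spec of A's dot-collapsing loop: per-char recursion with a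
-- "previous kept char was a dot" flag.
def pvCollapse (prevDot : Bool) : List Char → List Char
  | [] => []
  | c :: rest =>
    if c = '.' then (if prevDot then pvCollapse true rest else '.' :: pvCollapse true rest)
    else c :: pvCollapse false rest

-- A's step-2 keep loop is a filter.
lemma step2_eq (s1 : List Char) :
    s1.foldl (fun t c =>
      if ¬ (PySem.Chars.isalnum c = true) then
        (if c = '-' ∨ c = '_' ∨ c = '.' then t ++ [c] else t)
      else t ++ [c]) [] = s1.filter pvKeep := by
  have h : (fun (t : List Char) c =>
      if ¬ (PySem.Chars.isalnum c = true) then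
        (if c = '-' ∨ c = '_' ∨ c = '.' then t ++ [c] else t)
      else t ++ [c]) =
      (fun t c => if pvKeep c = true then t ++ [(fun x => x) c] else t) := by
    funext t c
    cases hA : PySem.Chars.isalnum c
    · simp only [Bool.false_eq_true, not_false_eq_true, if_true]
      split_ifs with h1 h2 h2 <;> simp_all [pvKeep]
    · simp [pvKeep, hA]
  rw [h, PySem.List.foldl_append_if]
  simp

-- A's dotCount foldl computes pvCollapse (dotCount stays nonnegative in A).
lemma step3_eq (cs : List Char) : ∀ (t : List Char) (d : Int), 0 ≤ d →
    (cs.foldl (fun (q : List Char × Int) c =>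
        if c = '.' then ((if q.2 = 0 then q.1 ++ ['.'] else q.1), q.2 + 1)
        else (q.1 ++ [c], (0 : Int))) (t, d)).1 =
    t ++ pvCollapse (decide (d ≠ 0)) cs := by
  induction cs with
  | nil => intro t d _; simp [pvCollapse]
  | cons c cs ih =>
    intro t d hd0
    rw [List.foldl_cons]
    by_cases hc : c = '.'
    · subst hc
      by_cases hd : d = 0
      · subst hd
        simp only [ite_true]
        rw [ih (t ++ ['.']) (0 + 1) (by omega)]
        simp [pvCollapse]
      · simp only [ite_true, if_neg hd]
        rw [ih t (d + 1) (by omega)]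
        simp [pvCollapse, hd, show d + 1 ≠ 0 by omega]
    · simp only [if_neg hc]
      rw [ih (t ++ [c]) 0 le_rfl]
      simp [pvCollapse, hc]

-- B's fused scan equals filter-then-collapse (joint statement covering both
-- flag values; in the prevDot = true case every filtered-out or dot character
-- of the run is exactly what B's inner dropWhile skips).
lemma scan_eq (s : List Char) :
    pvScan s = pvCollapse false (s.filter pvKeep) ∧
    pvScan (s.dropWhile (fun d => ¬ pvAllowed d)) = pvCollapse true (s.filter pvKeep) := by
  induction s with
  | nil => simp [pvScan, pvCollapse]
  | cons c rest ih =>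
    by_cases hA : pvAllowed c = true
    · have hdot : ¬ c = '.' := fun h => by subst h; exact absurd hA (by decide)
      have hk : pvKeep c = true := by simp [pvKeep, pvAllowed] at hA ⊢; tauto
      constructor
      · rw [pvScan]; simp [hA, hk, pvCollapse, hdot, ih.1]
      · rw [List.dropWhile_cons_of_neg (by simp [hA])]
        rw [pvScan]; simp [hA, hk, pvCollapse, hdot, ih.1]
    · by_cases hc : c = '.'
      · subst hc
        have hk : pvKeep '.' = true := by decide
        have h2 : pvScan (rest.dropWhile (fun d => !pvAllowed d)) =
            pvCollapse true (rest.filter pvKeep) := by simpa using ih.2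
        constructor
        · rw [pvScan]; simp [hA, hk, pvCollapse, h2]
        · rw [List.dropWhile_cons_of_pos (by simp [hA])]
          simp [hk, pvCollapse, h2]
      · have hk : ¬ pvKeep c = true := by
          simp [pvKeep, pvAllowed] at hA ⊢; tauto
        have h2 : pvScan (rest.dropWhile (fun d => !pvAllowed d)) =
            pvCollapse true (rest.filter pvKeep) := by simpa using ih.2
        constructor
        · rw [pvScan]; simp [hA, hc, List.filter_cons_of_neg (by simpa using hk), ih.1]
        · rw [List.dropWhile_cons_of_pos (by simp [hA])]
          simp [List.filter_cons_of_neg (by simpa using hk), h2]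

-- The post-processing tail (steps 4-7) of the two ports agrees on any cleaned string.
lemma tail_eq (t : List Char) :
    (let sz : Int := PySem.Chars.len t
     let t3 := if sz = 0 then t ++ ['a'] else t
     let sz3 : Int := if sz = 0 then sz + 1 else sz
     let t4 := if sz3 > 15 then pvRstripDot (PySem.List.slice t3 none (some 15)) else t3
     let sz4 : Int := if sz3 > 15 then 15 else sz3
     if sz4 ≤ 2 then
        match PySem.List.pyGet? t4 (-1) with
        | some lc => (PySem.List.pyRange 0 (3 - sz4) 1).foldl (fun u _ => u ++ [lc]) t4
        | none => t4
     else t4) =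
    (let t1 := if t.isEmpty then ['a'] else t
     if t1.length > 15 then (((PySem.List.slice t1 none (some 15)).reverse.dropWhile (· == '.')).reverse)
     else if t1.length < 3 then
       match PySem.List.pyGet? t1 (-1) with
       | some lc => t1 ++ List.replicate (3 - t1.length) lc
       | none => t1
     else t1) := by
  by_cases h0 : t = []
  · subst h0; decide
  · have hlen : 0 < t.length := List.length_pos_iff.mpr h0
    have hsz : PySem.Chars.len t = (t.length : Int) := by simp [PySem.Chars.len_eq]
    simp only [hsz, List.isEmpty_iff, h0, if_false]
    have hne : ¬ ((t.length : Int) = 0) := by omega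
    simp only [if_neg hne]
    by_cases h15 : t.length > 15
    · have h15' : ((t.length : Int) > 15) := by exact_mod_cast h15
      rw [if_pos h15', if_pos h15, if_pos h15']
      rw [if_neg (by omega : ¬ ((15 : Int) ≤ 2))]
      simp [pvRstripDot]
    · have h15' : ¬ ((t.length : Int) > 15) := by omega
      rw [if_neg h15', if_neg h15, if_neg h15']
      by_cases h3 : t.length < 3
      · have h3' : (t.length : Int) ≤ 2 := by omega
        rw [if_pos h3', if_pos h3]
        cases hg : PySem.List.pyGet? t (-1) with
        | none => rfl
        | some lc =>
          interval_cases h : t.length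
          · have e2 : (3 - ((1 : Nat) : Int)) = 2 := by norm_num
            rw [e2, (by decide : PySem.List.pyRange 0 2 1 = [0, 1])]
            simp [List.replicate]
          · have e1 : (3 - ((2 : Nat) : Int)) = 1 := by norm_num
            rw [e1, (by decide : PySem.List.pyRange 0 1 1 = [0])]
            simp [List.replicate]
      · have h3' : ¬ ((t.length : Int) ≤ 2) := by omega
        rw [if_neg h3', if_neg h3]

-- ===== VERDICT (by name: the statement is the Claim_ definition above) =====
set_option maxHeartbeats 1000000 in
theorem solution_spec : Claim_equal_solution := by
  intro new_id _
  unfold Spec_solution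
  simp only [solution, solution_alt]
  rw [step2_eq, step3_eq _ [] 0 le_rfl]
  simp only [List.nil_append, decide_true, Bool.not_true, decide_not]
  rw [← (scan_eq (PySem.Chars.lower new_id.toList)).1]
  exact congrArg String.ofList (tail_eq _)
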